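-- pv_equiv track=rewrite | github.com/Neurojedi/Biofunctions | proteins/SpectrumConvolution.py | SpectrumConvolution
-- ===== SOURCE A (Python) =====
-- def SpectrumConvolution(spectrum):
--     spectrum=sorted(spectrum)
--     convolution = []
--     for i, cm in enumerate(spectrum[:-1]):
--         for mass in spectrum[i+1:]:
--             if mass == cm:
--                 continue
--             convolution.append(mass - cm)
--     convolution=sorted(convolution)
--     return convolution
-- ===== SOURCE B (Python) =====
-- def SpectrumConvolution(spectrum):
--     s = sorted(spectrum)
--     runs = []
--     for m in s:
--         if runs and runs[-1][0] == m:
--             runs[-1] = (runs[-1][0], runs[-1][1] + 1)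
--         else:
--             runs.append((m, 1))
--     convolution = []
--     for i, (v, c) in enumerate(runs):
--         for (w, d) in runs[i + 1:]:
--             r = c * d
--             if r == 1:
--                 convolution.append(w - v)
--             else:
--                 convolution += [w - v] * r
--     return sorted(convolution)
-- ===== Notes on version B (the rewrite author's own statement) =====
-- stated objective: alternative
-- what changed: B run-length-encodes the sorted spectrum and loops over pairs of distinct-value runs, emitting each difference once with multiplicity count_i*count_j, instead of A's pairwise loop over all spectrum elements; the pairwise work scales with the number of distinct masses rather than with n.
import Mathlib
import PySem

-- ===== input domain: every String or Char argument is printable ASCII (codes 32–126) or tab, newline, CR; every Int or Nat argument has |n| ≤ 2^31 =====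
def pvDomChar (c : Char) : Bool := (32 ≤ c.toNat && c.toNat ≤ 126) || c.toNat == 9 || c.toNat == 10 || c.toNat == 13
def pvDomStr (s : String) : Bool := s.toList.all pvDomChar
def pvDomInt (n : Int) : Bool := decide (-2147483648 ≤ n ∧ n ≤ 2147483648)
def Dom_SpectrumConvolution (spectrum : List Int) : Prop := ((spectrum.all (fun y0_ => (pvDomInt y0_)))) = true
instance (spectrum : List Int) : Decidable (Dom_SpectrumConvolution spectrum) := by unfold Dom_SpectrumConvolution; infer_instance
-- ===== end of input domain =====

-- B run-length-encodes the sorted spectrum and loops over pairs of distinct-value runs,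
-- emitting each difference with multiplicity count_i * count_j, instead of A's pairwise
-- loop over all elements (alternative algorithm; pairwise work scales with distinct masses).

-- ===== PORT A =====
def SpectrumConvolution (spectrum : List Int) : List Int :=
  let s := PySem.List.sorted spectrum (fun x => x) false
  let convolution : List Int :=
    (PySem.List.enumerate (PySem.List.slice s none (some (-1))) 0).foldl
      (fun conv p =>
        (PySem.List.slice s (some (p.1 + 1)) none).foldl
          (fun conv mass => if mass == p.2 then conv else conv ++ [mass - p.2]) conv) []
  PySem.List.sorted convolution (fun x => x) false

-- ===== PORT B =====
-- body of Source B's run-length-encoding loop: 'if runs and runs[-1][0] == m: …'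
def pvStep (runs : List (Int × Int)) (m : Int) : List (Int × Int) :=
  if (!runs.isEmpty) && ((runs.getLastD (0, 0)).1 == m) then
    runs.dropLast ++ [((runs.getLastD (0, 0)).1, (runs.getLastD (0, 0)).2 + 1)]
  else runs ++ [(m, 1)]

def SpectrumConvolution_alt (spectrum : List Int) : List Int :=
  let s := PySem.List.sorted spectrum (fun x => x) false
  let runs := s.foldl pvStep []
  let convolution : List Int :=
    (PySem.List.enumerate runs 0).foldl
      (fun conv p =>
        (PySem.List.slice runs (some (p.1 + 1)) none).foldl
          (fun conv q =>
            let r := p.2.2 * q.2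
            if r == 1 then conv ++ [q.1 - p.2.1]
            else conv ++ PySem.List.pyRepeat [q.1 - p.2.1] r) conv) []
  PySem.List.sorted convolution (fun x => x) false

-- ===== PRECONDITION & SPEC =====
def Spec_SpectrumConvolution (spectrum : List Int) (out : List Int) : Prop := out = SpectrumConvolution_alt spectrum
instance (spectrum : List Int) (out : List Int) : Decidable (Spec_SpectrumConvolution spectrum out) := by unfold Spec_SpectrumConvolution; infer_instance

-- ===== CLAIM (what is proved, stated in full; the proofs are below) =====
def Claim_equal_SpectrumConvolution : Prop := ∀ (spectrum : List Int), Dom_SpectrumConvolution spectrum → Spec_SpectrumConvolution spectrum (SpectrumConvolution spectrum)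

-- ===== LEMMAS AND PROOFS =====

-- the multiset of differences A collects, recursively (on the sorted list)
def pvDA : List Int → List Int
  | [] => []
  | h :: t => (t.filter (fun y => y != h)).map (fun y => y - h) ++ pvDA t

-- canonical run-length encoding, recursively
def pvRLE : List Int → List (Int × Int)
  | [] => []
  | v :: t => (v, 1 + ((t.takeWhile (· == v)).length : Int)) :: pvRLE (t.dropWhile (· == v))
  termination_by l => l.length
  decreasing_by simpa using Nat.lt_succ_of_le (List.length_dropWhile_le _ _)

-- the multiset of differences B collects from a run list, recursively
def pvE : List (Int × Int) → List Int
  | [] => []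
  | r :: rs => rs.flatMap (fun q => PySem.List.pyRepeat [q.1 - r.1] (r.2 * q.2)) ++ pvE rs

lemma pvA_outer (s : List Int) : ∀ (v : List Int) (k : Nat) (acc : List Int), s.drop k = v →
    (PySem.List.enumerate v.dropLast (k : Int)).foldl
      (fun conv p =>
        (PySem.List.slice s (some (p.1 + 1)) none).foldl
          (fun conv mass => if mass == p.2 then conv else conv ++ [mass - p.2]) conv) acc
    = acc ++ pvDA v := by
  intro v
  induction v with
  | nil => intro k acc _; simp [pvDA]
  | cons h t ih =>
      intro k acc hdrop
      cases t with
      | nil => simp [pvDA]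
      | cons a t' =>
          have hdl : (h :: a :: t').dropLast = h :: (a :: t').dropLast := rfl
          rw [hdl, PySem.List.enumerate_cons, List.foldl_cons]
          have hcast : (k : Int) + 1 = ((k + 1 : Nat) : Int) := by push_cast; ring
          have hdrop1 : s.drop (k + 1) = a :: t' := by
            rw [← List.tail_drop, hdrop]; rfl
          have hslice : PySem.List.slice s (some ((k : Int) + 1)) none = a :: t' := by
            rw [hcast, PySem.List.slice_from_natCast, hdrop1]
          simp only [hslice]
          have hfun : ∀ (c : List Int) (m : Int), m ∈ (a :: t') →
              (if m == h then c else c ++ [m - h]) = (if m != h then c ++ [m - h] else c) := by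
            intro c m _
            by_cases hm : m = h <;> simp [hm]
          have hre := PySem.List.foldl_congr_mem
            (f := fun (c : List Int) (m : Int) => if m == h then c else c ++ [m - h])
            (g := fun (c : List Int) (m : Int) => if m != h then c ++ [m - h] else c)
            (l := a :: t') (init := acc) (fun c m hm => hfun c m hm)
          rw [hre,
              PySem.List.foldl_append_if (p := fun y => y != h) (f := fun y => y - h),
              hcast, ih (k + 1) _ hdrop1]
          simp [pvDA]

lemma pvRuns_aux : ∀ (t : List Int) (v c : Int) (rs : List (Int × Int)),
    (∀ y ∈ t, v ≤ y) → t.Pairwise (· ≤ ·) →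
    t.foldl pvStep (rs ++ [(v, c)]) =
      rs ++ (v, c + ((t.takeWhile (· == v)).length : Int)) :: pvRLE (t.dropWhile (· == v)) := by
  intro t
  induction t with
  | nil => intro v c rs _ _; simp [pvRLE]
  | cons m t' ih =>
      intro v c rs hge hpw
      rw [List.foldl_cons]
      by_cases hm : m = v
      · subst hm
        have hstep : pvStep (rs ++ [(m, c)]) m = rs ++ [(m, c + 1)] := by
          simp [pvStep]
        rw [hstep, ih m (c + 1) rs (fun y hy => (List.pairwise_cons.mp hpw).1 y hy)
              (List.pairwise_cons.mp hpw).2]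
        simp [List.takeWhile, List.dropWhile]
        ring_nf
      · have hstep : pvStep (rs ++ [(v, c)]) m = (rs ++ [(v, c)]) ++ [(m, 1)] := by
          simp [pvStep]
          exact fun h => hm h.symm
        rw [hstep, ih m 1 (rs ++ [(v, c)]) (fun y hy => (List.pairwise_cons.mp hpw).1 y hy)
              (List.pairwise_cons.mp hpw).2]
        have h1 : (m == v) = false := by simp [hm]
        simp [List.takeWhile, List.dropWhile, h1, pvRLE]

lemma pvRuns_eq_pvRLE (s : List Int) (hs : s.Pairwise (· ≤ ·)) :
    s.foldl pvStep [] = pvRLE s := by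
  cases s with
  | nil => simp [pvRLE]
  | cons v t =>
      rw [List.foldl_cons]
      have h0 : pvStep [] v = [] ++ [(v, 1)] := by simp [pvStep]
      rw [h0, pvRuns_aux t v 1 [] (fun y hy => (List.pairwise_cons.mp hs).1 y hy)
            (List.pairwise_cons.mp hs).2]
      simp [pvRLE]

lemma pvRLE_expand : ∀ (s : List Int),
    (pvRLE s).flatMap (fun r => List.replicate r.2.toNat r.1) = s := by
  intro s
  induction s using pvRLE.induct with
  | case1 => simp [pvRLE]
  | case2 v t ih =>
      rw [pvRLE]
      have htw : t.takeWhile (· == v) = List.replicate (t.takeWhile (· == v)).length v := by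
        apply List.eq_replicate_of_mem
        intro y hy
        have hp := List.mem_takeWhile_imp (p := (· == v)) hy
        exact eq_of_beq hp
      simp only [List.flatMap_cons, ih]
      have hnat : ((1 : Int) + ((t.takeWhile (· == v)).length : Int)).toNat
          = 1 + (t.takeWhile (· == v)).length := by omega
      rw [hnat, List.replicate_add, List.replicate_one, ← htw, List.append_assoc,
        List.takeWhile_append_dropWhile]
      rfl

lemma pvRLE_counts_pos : ∀ (s : List Int) (q : Int × Int), q ∈ pvRLE s → 1 ≤ q.2 := by
  intro s
  induction s using pvRLE.induct with
  | case1 => intro q hq; simp [pvRLE] at hq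
  | case2 v t ih =>
      intro q hq
      rw [pvRLE] at hq
      rcases List.mem_cons.mp hq with h | h
      · subst h; simp
      · exact ih q h

lemma pvDA_replicate : ∀ (k : Nat) (v : Int) (b : List Int), (∀ y ∈ b, y ≠ v) →
    pvDA (List.replicate k v ++ b)
      = (List.replicate k (b.map (fun y => y - v))).flatten ++ pvDA b := by
  intro k
  induction k with
  | zero => intro v b _; simp
  | succ k ih =>
      intro v b hb
      rw [List.replicate_succ, List.cons_append, pvDA, ih v b hb]
      have hfil : (List.replicate k v ++ b).filter (fun y => y != v) = b := by
        rw [List.filter_append]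
        have h1 : (List.replicate k v).filter (fun y => y != v) = [] := by
          simp
        have h2 : b.filter (fun y => y != v) = b :=
          List.filter_eq_self.mpr (fun y hy => by simpa using hb y hy)
        rw [h1, h2, List.nil_append]
      rw [hfil, List.replicate_succ, List.flatten_cons, List.append_assoc]

lemma pvFlattenRepAppend : ∀ (n : Nat) (x y : List Int),
    (List.replicate n (x ++ y)).flatten.Perm
      ((List.replicate n x).flatten ++ (List.replicate n y).flatten) := by
  intro n
  induction n with
  | zero => intro x y; simp
  | succ n ih =>
      intro x y
      simp only [List.replicate_succ, List.flatten_cons]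
      refine ((List.Perm.append_left (x ++ y) (ih x y)).trans ?_)
      have h1 : x ++ y ++ ((List.replicate n x).flatten ++ (List.replicate n y).flatten)
          = x ++ (y ++ (List.replicate n x).flatten) ++ (List.replicate n y).flatten := by
        simp [List.append_assoc]
      have h2 : x ++ ((List.replicate n x).flatten ++ y) ++ (List.replicate n y).flatten
          = x ++ (List.replicate n x).flatten ++ (y ++ (List.replicate n y).flatten) := by
        simp [List.append_assoc]
      rw [h1, ← h2]
      exact List.Perm.append_right _ (List.Perm.append_left _ List.perm_append_comm)

lemma pvFlattenRepRep (n m : Nat) (d : Int) :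
    (List.replicate n (List.replicate m d)).flatten = List.replicate (n * m) d := by
  induction n with
  | zero => simp
  | succ n ih =>
      rw [List.replicate_succ, List.flatten_cons, ih, Nat.succ_mul, Nat.add_comm,
        List.replicate_add]

lemma pvChunkPerm : ∀ (rs : List (Int × Int)) (n : Nat) (v : Int), (∀ q ∈ rs, 1 ≤ q.2) →
    (List.replicate n ((rs.flatMap (fun r => List.replicate r.2.toNat r.1)).map
        (fun y => y - v))).flatten.Perm
      (rs.flatMap (fun q => List.replicate ((n : Int) * q.2).toNat (q.1 - v))) := by
  intro rs
  induction rs with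
  | nil => intro n v _; simp
  | cons q rs' ih =>
      intro n v hpos
      rw [List.flatMap_cons, List.flatMap_cons, List.map_append, List.map_replicate]
      refine (pvFlattenRepAppend n _ _).trans ?_
      have hq : 1 ≤ q.2 := hpos q (List.mem_cons_self)
      have hcast : ((n : Int) * q.2).toNat = n * q.2.toNat := by
        rcases Int.le.dest hq with ⟨w, hw⟩
        have h2 : q.2 = ((1 + w : Nat) : Int) := by push_cast; omega
        rw [h2, ← Nat.cast_mul, Int.toNat_natCast, Int.toNat_natCast]
      rw [pvFlattenRepRep, ← hcast]
      exact List.Perm.append_left _ (ih n v (fun r hr => hpos r (List.mem_cons_of_mem _ hr)))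

lemma pvDA_perm_pvE : ∀ (s : List Int), s.Pairwise (· ≤ ·) →
    (pvDA s).Perm (pvE (pvRLE s)) := by
  intro s
  induction s using pvRLE.induct with
  | case1 => intro _; simp [pvDA, pvRLE, pvE]
  | case2 v t ih =>
      intro hs
      have hge : ∀ y ∈ t, v ≤ y := (List.pairwise_cons.mp hs).1
      have htpw : t.Pairwise (· ≤ ·) := (List.pairwise_cons.mp hs).2
      have hbpw : (t.dropWhile (· == v)).Pairwise (· ≤ ·) :=
        htpw.sublist (List.dropWhile_sublist _)
      have hbne : ∀ y ∈ t.dropWhile (· == v), y ≠ v := by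
        cases hd : t.dropWhile (· == v) with
        | nil => intro y hy; simp at hy
        | cons h b' =>
            have hl : 0 < (t.dropWhile (· == v)).length := by simp [hd]
            have hne := List.dropWhile_get_zero_not (· == v) t hl
            simp [hd] at hne
            have hhv : h ≠ v := hne
            rw [hd] at hbpw
            have hhmem : h ∈ t := (List.dropWhile_sublist _).mem (hd ▸ List.mem_cons_self)
            have hvh : v < h := lt_of_le_of_ne (hge h hhmem) (Ne.symm hhv)
            intro y hy
            rcases List.mem_cons.mp hy with rfl | hy'
            · exact hhv
            · have := (List.pairwise_cons.mp hbpw).1 y hy'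
              omega
      have htw : t.takeWhile (· == v) = List.replicate (t.takeWhile (· == v)).length v := by
        apply List.eq_replicate_of_mem
        intro y hy
        have hp := List.mem_takeWhile_imp (p := (· == v)) hy
        exact eq_of_beq hp
      have hdecomp : v :: t
          = List.replicate ((t.takeWhile (· == v)).length + 1) v ++ t.dropWhile (· == v) := by
        conv_lhs => rw [← List.takeWhile_append_dropWhile (p := (· == v)) (l := t)]
        rw [Nat.add_comm, List.replicate_add, List.replicate_one, ← htw]
        rfl
      conv_lhs => rw [hdecomp]
      rw [pvDA_replicate _ _ _ hbne]
      have hrle : pvRLE (v :: t)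
          = (v, 1 + ((t.takeWhile (· == v)).length : Int)) :: pvRLE (t.dropWhile (· == v)) := by
        simp [pvRLE]
      rw [hrle, pvE]
      refine List.Perm.append ?_ (ih hbpw)
      have hrw : (t.dropWhile (· == v)).map (fun y => y - v)
          = (((pvRLE (t.dropWhile (· == v))).flatMap
              (fun r => List.replicate r.2.toNat r.1)).map (fun y => y - v)) := by
        rw [pvRLE_expand]
      rw [hrw]
      refine (pvChunkPerm _ _ v (fun q hq => pvRLE_counts_pos _ q hq)).trans ?_
      apply List.Perm.of_eq
      have hfg : (fun (q : Int × Int) =>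
            List.replicate (((((t.takeWhile (· == v)).length + 1 : Nat) : Int)) * q.2).toNat (q.1 - v))
          = fun (q : Int × Int) =>
            PySem.List.pyRepeat [q.1 - v] ((1 + ((t.takeWhile (· == v)).length : Int)) * q.2) := by
        funext q
        rw [PySem.List.pyRepeat_singleton]
        congr 2
        push_cast
        ring
      rw [hfg]

lemma pvB_outer (runs : List (Int × Int)) : ∀ (v : List (Int × Int)) (k : Nat)
    (acc : List Int), runs.drop k = v →
    (PySem.List.enumerate v (k : Int)).foldl
      (fun conv p =>
        (PySem.List.slice runs (some (p.1 + 1)) none).foldl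
          (fun conv q =>
            let r := p.2.2 * q.2
            if r == 1 then conv ++ [q.1 - p.2.1]
            else conv ++ PySem.List.pyRepeat [q.1 - p.2.1] r) conv) acc
    = acc ++ pvE v := by
  intro v
  induction v with
  | nil => intro k acc _; simp [pvE]
  | cons r v' ih =>
      intro k acc hdrop
      rw [PySem.List.enumerate_cons, List.foldl_cons]
      have hcast : (k : Int) + 1 = ((k + 1 : Nat) : Int) := by push_cast; ring
      have hdrop1 : runs.drop (k + 1) = v' := by
        rw [← List.tail_drop, hdrop]; rfl
      have hslice : PySem.List.slice runs (some ((k : Int) + 1)) none = v' := by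
        rw [hcast, PySem.List.slice_from_natCast, hdrop1]
      simp only [hslice]
      have hfg : (fun (conv : List Int) (q : Int × Int) =>
            let rr := r.2 * q.2
            if rr == 1 then conv ++ [q.1 - r.1]
            else conv ++ PySem.List.pyRepeat [q.1 - r.1] rr)
          = fun conv q => conv ++ PySem.List.pyRepeat [q.1 - r.1] (r.2 * q.2) := by
        funext conv q
        by_cases h1 : r.2 * q.2 = 1
        · simp [h1, PySem.List.pyRepeat_singleton]
        · simp [h1]
      rw [hfg, PySem.List.foldl_append_eq_flatMap, hcast, ih (k + 1) _ hdrop1]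
      simp [pvE]

-- ===== VERDICT (by name: the statement is the Claim_ definition above) =====
theorem SpectrumConvolution_spec : Claim_equal_SpectrumConvolution := by
  intro spectrum _
  unfold Spec_SpectrumConvolution SpectrumConvolution SpectrumConvolution_alt
  simp only [PySem.List.slice_to_neg_one]
  set s := PySem.List.sorted spectrum (fun x => x) false with hsdef
  have hpair : s.Pairwise (· ≤ ·) := PySem.List.sorted_pairwise spectrum (fun x => x)
  have hA := pvA_outer s s 0 [] rfl
  rw [Nat.cast_zero] at hA
  have hruns := pvRuns_eq_pvRLE s hpair
  have hB := pvB_outer (s.foldl pvStep []) (s.foldl pvStep []) 0 [] rfl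
  rw [Nat.cast_zero] at hB
  rw [hA, hB, List.nil_append, List.nil_append, hruns]
  exact PySem.List.sorted_eq_sorted_of_perm _ _ _ (fun a b hab => hab)
    (pvDA_perm_pvE s hpair)
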